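-- pv_equiv track=rewrite | github.com/Shrikant-Bawankule/nirmaan-ai-intern-case-study | scoring_logic.py | detect_flow
-- ===== SOURCE A (Python) =====
-- SALUTATION_PHRASES = {
--     "excellent": ["i am excited", "feeling great", "i am delighted", "i'm excited"],
--     "good": ["good morning", "good afternoon", "good evening", "good day", "hello everyone"],
--     "normal": ["hi", "hello"]
-- }
--
-- def detect_flow(text: str) -> bool:
--     t = text.lower()
--     sal_idx = -1
--     for p in SALUTATION_PHRASES["normal"] + SALUTATION_PHRASES["good"] + SALUTATION_PHRASES["excellent"]:
--         idx = t.find(p)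
--         if idx >= 0:
--             sal_idx = idx
--             break
--     name_patterns = ["my name is", "myself", "i am", "i'm", "this is"]
--     name_idx = min([t.find(p) for p in name_patterns if t.find(p) >= 0] or [999999])
--     if sal_idx >= 0 and name_idx >= 0 and (name_idx - sal_idx) < 200:
--         return True
--     if any(p in t for p in name_patterns):
--         return True
--     return False
-- ===== SOURCE B (Python) =====
-- def detect_flow(text: str) -> bool:
--     t = text.lower()
--     return any(p in t for p in ("my name is", "myself", "i am", "i'm", "this is"))
-- ===== Notes on version B (the rewrite author's own statement) =====
-- stated objective: simpler
-- what changed: B drops A's entire salutation scan, find-index list, min/sentinel and 200-char window and returns a single membership check (does any of the five name patterns occur in the lowercased text); Pre_ excludes the texts with no name pattern but a salutation first matching at index >= 999800, where A's 999999 sentinel lands inside the distance window and A returns True while B returns False.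
import Mathlib
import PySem

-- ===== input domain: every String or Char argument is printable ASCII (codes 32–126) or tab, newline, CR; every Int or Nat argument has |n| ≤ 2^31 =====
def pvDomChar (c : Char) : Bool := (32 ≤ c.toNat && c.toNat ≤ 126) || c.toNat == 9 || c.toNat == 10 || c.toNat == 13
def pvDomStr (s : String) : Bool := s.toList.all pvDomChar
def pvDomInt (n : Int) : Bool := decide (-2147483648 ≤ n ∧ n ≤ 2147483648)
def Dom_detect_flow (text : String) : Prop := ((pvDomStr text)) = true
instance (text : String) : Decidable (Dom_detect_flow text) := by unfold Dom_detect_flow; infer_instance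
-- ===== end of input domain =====

-- B replaces A's salutation scan + find-list/min/sentinel + 200-char window by a single
-- "any name pattern occurs" membership check (objective: simpler); inside Pre_ below the
-- dropped machinery never changes A's answer.

-- ===== PORT A =====
-- SALUTATION_PHRASES["normal"] ++ ["good"] ++ ["excellent"], in A's loop order
def pvSalPhrases : List String :=
  ["hi", "hello"] ++
  ["good morning", "good afternoon", "good evening", "good day", "hello everyone"] ++
  ["i am excited", "feeling great", "i am delighted", "i'm excited"]

def pvNamePatterns : List String := ["my name is", "myself", "i am", "i'm", "this is"]

-- the for-loop over the phrases: sal_idx = -1 unless some phrase is found (break on first)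
def pvSalLoop (t : String) : List String → Int
  | [] => -1
  | p :: ps =>
      let idx := PySem.Str.find t p
      if 0 ≤ idx then idx else pvSalLoop t ps

def detect_flow (text : String) : Bool :=
  let t := PySem.Str.lower text
  let sal_idx := pvSalLoop t pvSalPhrases
  let cand := (pvNamePatterns.map (fun p => PySem.Str.find t p)).filter (fun i => decide (0 ≤ i))
  -- min([...] or [999999]); the list handed to min is never empty, so Python's min returns
  let name_idx := (PySem.List.min? (if cand.isEmpty then [(999999 : Int)] else cand) (fun x => x)).getD 999999
  if 0 ≤ sal_idx ∧ 0 ≤ name_idx ∧ name_idx - sal_idx < 200 then true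
  else if pvNamePatterns.any (fun p => PySem.Str.isIn p t) then true
  else false

-- ===== PORT B =====
def detect_flow_alt (text : String) : Bool :=
  let t := PySem.Str.lower text
  pvNamePatterns.any (fun p => PySem.Str.isIn p t)

-- ===== PRECONDITION & SPEC =====
-- Pre_ excludes texts on which A still returns (no crash): those with no name pattern at all but a
-- salutation whose first match sits at index >= 999800, where A's empty-candidate sentinel 999999
-- lands inside the 200-char window and A answers True although no name introduction occurs, while
-- B answers False; such inputs need >= 999802 characters and the corner value is an artefact of the
-- sentinel, so it is carved out rather than matched.
def Pre_detect_flow (text : String) : Prop :=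
  (pvNamePatterns.all (fun p => PySem.Str.find (PySem.Str.lower text) p == -1)
    && decide ((999800 : Int) ≤
        (((pvSalPhrases.map (fun p => PySem.Str.find (PySem.Str.lower text) p)).filter
            (fun i => decide (0 ≤ i))).headD (-1)))) = false
instance (text : String) : Decidable (Pre_detect_flow text) := by unfold Pre_detect_flow; infer_instance

def pvWitness_detect_flow : String := "hello, i am bob"

def Spec_detect_flow (text : String) (out : Bool) : Prop := out = detect_flow_alt text
instance (text : String) (out : Bool) : Decidable (Spec_detect_flow text out) := by unfold Spec_detect_flow; infer_instance

-- ===== CLAIM (what is proved, stated in full; the proofs are below) =====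
def Claim_equal_detect_flow : Prop := ∀ (text : String), Dom_detect_flow text → Pre_detect_flow text → Spec_detect_flow text (detect_flow text)

-- ===== LEMMAS AND PROOFS =====

-- A's break-on-first-hit loop equals the head of the filtered find list
theorem pvSalLoop_eq_headD (t : String) (l : List String) :
    pvSalLoop t l =
      ((l.map (fun p => PySem.Str.find t p)).filter (fun i => decide (0 ≤ i))).headD (-1) := by
  induction l with
  | nil => rfl
  | cons p ps ih =>
      simp only [pvSalLoop, List.map_cons, List.filter_cons]
      by_cases h : (0 : Int) ≤ PySem.Str.find t p
      · rw [PySem.Str.find_eq] at h; simp [h]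
      · rw [PySem.Str.find_eq] at h; simp [h, ih]

theorem name_finds_neg (text : String)
    (hB : ¬ pvNamePatterns.any (fun p => PySem.Str.isIn p (PySem.Str.lower text)) = true) :
    ∀ p ∈ pvNamePatterns, PySem.Str.find (PySem.Str.lower text) p = -1 := by
  intro p hp
  rw [PySem.Str.find_eq, PySem.Chars.find_eq_neg_one_iff]
  have h1 : PySem.Str.isIn p (PySem.Str.lower text) = false := by
    cases h : PySem.Str.isIn p (PySem.Str.lower text)
    · rfl
    · exact absurd (List.any_eq_true.mpr ⟨p, hp, h⟩) hB
  rw [PySem.Str.isIn_eq] at h1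
  exact (PySem.Chars.isIn_eq_false_iff _ _).mp h1

-- ===== VERDICT =====
theorem detect_flow_spec : Claim_equal_detect_flow := by
  intro text _ hP
  show detect_flow text = detect_flow_alt text
  unfold detect_flow detect_flow_alt
  by_cases hB : pvNamePatterns.any (fun p => PySem.Str.isIn p (PySem.Str.lower text)) = true
  · simp only [hB]
    split_ifs <;> rfl
  · have hall := name_finds_neg text hB
    have hcand : (pvNamePatterns.map (fun p => PySem.Str.find (PySem.Str.lower text) p)).filter
        (fun i => decide ((0:Int) ≤ i)) = [] := by
      rw [List.filter_eq_nil_iff]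
      intro i hi
      rcases List.mem_map.mp hi with ⟨p, hp, rfl⟩
      rw [hall p hp]; decide
    -- from Pre_ and names absent: the salutation first-match index is < 999800
    have ha : pvNamePatterns.all (fun p => PySem.Str.find (PySem.Str.lower text) p == -1) = true := by
      rw [List.all_eq_true]; intro p hp; rw [hall p hp]; decide
    have hsal : ¬ ((999800 : Int) ≤
        (((pvSalPhrases.map (fun p => PySem.Str.find (PySem.Str.lower text) p)).filter
          (fun i => decide (0 ≤ i))).headD (-1))) := by
      intro hle
      unfold Pre_detect_flow at hP
      rw [ha, Bool.true_and, decide_eq_false_iff_not] at hP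
      exact hP hle
    rw [← pvSalLoop_eq_headD] at hsal
    simp only [hcand, hB, List.isEmpty_nil, if_true, PySem.List.min?_id_cons, List.foldl_nil,
      Option.getD_some]
    simp
    omega
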